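-- pv_equiv track=rewrite | github.com/JoelAtDeluxe/AdventOfCode2017 | 14/defrag.py | get_num_square_of_type
-- ===== SOURCE A (Python) =====
-- from typing import List
--
-- def make_to_binary():
--     junk = {}
--     for i in range(10):
--         junk[f'{i}'] = '{0:04b}'.format(i)
--
--     for i in range(6):
--         junk[ chr(ord('a')+i) ] = '{0:04b}'.format(10 + i)
--
--     def to_binary_str(hex_str: str) -> str:
--         hex_str = hex_str.lower()
--         in_binary = [ junk.get(ch) for ch in hex_str ]
--         return "".join(in_binary)
--
--     def to_binary_int_array(hex_str: str) -> List[int]: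
--         s = to_binary_str(hex_str)
--         return [int(ch) for ch in s]
--
--     return to_binary_str, to_binary_int_array
--
-- def get_num_square_of_type(memory, used=True):
--     char_type = 1 if used else 0
--     _, to_binary_int_array = make_to_binary()
--     binary_memory = [to_binary_int_array(r) for r in memory]
--     used_counts = [sum(r) for r in binary_memory]
--     max_value = len(binary_memory[0]) * len(memory)
--     sum_used = sum(used_counts)
--     return sum_used if used else max_value - sum_used
-- ===== SOURCE B (Python) =====
-- # One-pass popcount-table sum: no binary strings / int arrays are ever built.
-- _POPCOUNT = {'0': 0, '1': 1, '2': 1, '3': 2, '4': 1, '5': 2, '6': 2, '7': 3,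
--              '8': 1, '9': 2, 'a': 2, 'b': 3, 'c': 2, 'd': 3, 'e': 3, 'f': 4}
--
-- def get_num_square_of_type(memory, used=True):
--     sum_used = sum(_POPCOUNT[ch] for row in memory for ch in row.lower())
--     if used:
--         return sum_used
--     return 4 * len(memory[0]) * len(memory) - sum_used
-- ===== Notes on version B (the rewrite author's own statement) =====
-- stated objective: simpler
-- what changed: Replaces the closure-built hex->binary-string dict and the per-row binary int arrays by a literal nibble-popcount table and one flat sum over all characters (no intermediate strings/lists are built).
import Mathlib
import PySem

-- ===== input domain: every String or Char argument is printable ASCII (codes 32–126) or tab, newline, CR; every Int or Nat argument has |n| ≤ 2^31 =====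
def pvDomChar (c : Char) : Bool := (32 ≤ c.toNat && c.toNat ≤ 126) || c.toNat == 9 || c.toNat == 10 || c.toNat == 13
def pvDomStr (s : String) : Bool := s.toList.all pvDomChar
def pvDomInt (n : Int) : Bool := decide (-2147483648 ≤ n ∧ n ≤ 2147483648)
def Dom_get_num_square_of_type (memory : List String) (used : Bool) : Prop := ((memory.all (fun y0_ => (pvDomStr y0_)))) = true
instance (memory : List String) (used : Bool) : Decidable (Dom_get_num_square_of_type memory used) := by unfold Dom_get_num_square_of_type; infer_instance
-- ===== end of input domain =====

set_option maxRecDepth 8000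


-- B replaces A's closure-built hex→binary-string dict and per-row binary int arrays by a
-- literal nibble-popcount table and one flat sum over all characters (simpler; measured faster).

-- ===== PORT A =====

-- '{0:04b}'.format(i), ported by hand; exact for 0 ≤ i ≤ 15, the only arguments A uses
def bin4 (i : Int) : String :=
  let n := i.toNat
  String.mk [(if n / 8 % 2 = 1 then '1' else '0'), (if n / 4 % 2 = 1 then '1' else '0'),
             (if n / 2 % 2 = 1 then '1' else '0'), (if n % 2 = 1 then '1' else '0')]

-- the dict 'junk' built inside make_to_binary()
def junkA : PySem.Dict String String :=
  let junk : PySem.Dict String String := PySem.Dict.empty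
  let junk := (PySem.List.pyRange 0 10 1).foldl
    (fun d i => d.insert (PySem.Int.toStr i) (bin4 i)) junk
  (PySem.List.pyRange 0 6 1).foldl
    (fun d i => d.insert (String.mk [Char.ofNat ('a'.toNat + i.toNat)]) (bin4 (10 + i))) junk

def to_binary_strA (hex_str : String) : Option String :=
  let h := PySem.Str.lower hex_str
  let in_binary : List (Option String) := h.toList.map (fun ch => junkA.get? (String.mk [ch]))
  -- "".join(in_binary) raises TypeError if any element is None: none there
  (in_binary.mapM id).map (fun l => PySem.Str.join "" l)

def to_binary_int_arrayA (hex_str : String) : Option (List Int) :=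
  (to_binary_strA hex_str).bind
    (fun s => s.toList.mapM (fun ch => PySem.Int.ofStr? (String.mk [ch])))

def get_num_square_of_type (memory : List String) (used : Bool) : Int :=
  let _char_type : Int := if used then 1 else 0
  match memory.mapM (fun r => to_binary_int_arrayA r) with
  | none => 0  -- Python raises TypeError (non-hex char); excluded by Pre_
  | some binary_memory =>
    let used_counts := binary_memory.map (fun r => r.foldl (· + ·) 0)
    match PySem.List.pyGet? binary_memory 0 with
    | none => 0  -- Python raises IndexError (empty memory); excluded by Pre_
    | some row0 =>
      let max_value : Int := (row0.length : Int) * (memory.length : Int)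
      let sum_used := used_counts.foldl (· + ·) 0
      if used then sum_used else max_value - sum_used

-- ===== PORT B =====

def popTableB : PySem.Dict String Int := PySem.Dict.ofList
  [("0", 0), ("1", 1), ("2", 1), ("3", 2), ("4", 1), ("5", 2), ("6", 2), ("7", 3),
   ("8", 1), ("9", 2), ("a", 2), ("b", 3), ("c", 2), ("d", 3), ("e", 3), ("f", 4)]

def get_num_square_of_type_alt (memory : List String) (used : Bool) : Int :=
  match (memory.flatMap (fun row => (PySem.Str.lower row).toList)).mapM
        (fun ch => popTableB.get? (String.mk [ch])) with
  | none => 0  -- Python raises KeyError (non-hex char); excluded by Pre_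
  | some pops =>
    let sum_used := pops.foldl (· + ·) 0
    if used then sum_used
    else
      match PySem.List.pyGet? memory 0 with
      | none => 0  -- Python raises IndexError (empty memory); excluded by Pre_
      | some r0 => 4 * PySem.Str.len r0 * (memory.length : Int) - sum_used

-- ===== PRECONDITION & SPEC =====

def hexChars : List Char :=
  ['0', '1', '2', '3', '4', '5', '6', '7', '8', '9',
   'a', 'b', 'c', 'd', 'e', 'f', 'A', 'B', 'C', 'D', 'E', 'F']

-- Pre_ excludes exactly the inputs where A raises: empty memory (IndexError) and
-- any character outside 0-9a-fA-F (TypeError from joining None).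
def Pre_get_num_square_of_type (memory : List String) (used : Bool) : Prop :=
  memory ≠ [] ∧ memory.all (fun r => r.toList.all (fun c => decide (c ∈ hexChars))) = true
instance (memory : List String) (used : Bool) : Decidable (Pre_get_num_square_of_type memory used) := by unfold Pre_get_num_square_of_type; infer_instance

def pvWitness_get_num_square_of_type : List String × Bool := (["a1", "0F"], false)

def Spec_get_num_square_of_type (memory : List String) (used : Bool) (out : Int) : Prop := out = get_num_square_of_type_alt memory used
instance (memory : List String) (used : Bool) (out : Int) : Decidable (Spec_get_num_square_of_type memory used out) := by unfold Spec_get_num_square_of_type; infer_instance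

-- ===== CLAIM (what is proved, stated in full; the proofs are below) =====
def Claim_equal_get_num_square_of_type : Prop := ∀ (memory : List String) (used : Bool), Dom_get_num_square_of_type memory used → Pre_get_num_square_of_type memory used → Spec_get_num_square_of_type memory used (get_num_square_of_type memory used)


-- ===== LEMMAS AND PROOFS =====

-- proof-side value functions: the nibble, its four bits, its popcount, A's binary string
def nibOf (c : Char) : Nat :=
  ['0', '1', '2', '3', '4', '5', '6', '7', '8', '9',
   'a', 'b', 'c', 'd', 'e', 'f'].idxOf (PySem.Chars.lowerChar c)
def bitsOf (c : Char) : List Int :=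
  [((nibOf c / 8 % 2 : Nat) : Int), ((nibOf c / 4 % 2 : Nat) : Int),
   ((nibOf c / 2 % 2 : Nat) : Int), ((nibOf c % 2 : Nat) : Int)]
def popOf (c : Char) : Int := (bitsOf c).sum
def strOf (c : Char) : String := String.mk ((bitsOf c).map (fun b => if b = 1 then '1' else '0'))

-- junkA evaluated once to a literal dict, so the per-char facts below are checked on the literal
def junkLit : PySem.Dict String String := PySem.Dict.ofList
    [("0", "0000"), ("1", "0001"), ("2", "0010"), ("3", "0011"), ("4", "0100"),
     ("5", "0101"), ("6", "0110"), ("7", "0111"), ("8", "1000"), ("9", "1001"),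
     ("a", "1010"), ("b", "1011"), ("c", "1100"), ("d", "1101"), ("e", "1110"),
     ("f", "1111")]

theorem junkA_eq : junkA = junkLit := by decide

theorem factA1_b : hexChars.all (fun c =>
    decide (junkLit.get? (String.mk [PySem.Chars.lowerChar c]) = some (strOf c))) = true := by rfl

theorem factA1 : ∀ c ∈ hexChars,
    junkA.get? (String.mk [PySem.Chars.lowerChar c]) = some (strOf c) := fun c hc => by
  rw [junkA_eq]; exact of_decide_eq_true (List.all_eq_true.mp factA1_b c hc)

theorem factA2_b : hexChars.all (fun c =>
    decide ((strOf c).toList.mapM (fun ch => PySem.Int.ofStr? (String.mk [ch])) = some (bitsOf c))) = true := by rfl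

theorem factA2 : ∀ c ∈ hexChars,
    (strOf c).toList.mapM (fun ch => PySem.Int.ofStr? (String.mk [ch])) = some (bitsOf c) :=
  fun c hc => of_decide_eq_true (List.all_eq_true.mp factA2_b c hc)

theorem factB_b : hexChars.all (fun c =>
    decide (popTableB.get? (String.mk [PySem.Chars.lowerChar c]) = some (popOf c))) = true := by rfl

theorem factB : ∀ c ∈ hexChars,
    popTableB.get? (String.mk [PySem.Chars.lowerChar c]) = some (popOf c) :=
  fun c hc => of_decide_eq_true (List.all_eq_true.mp factB_b c hc)

theorem factLen_b : hexChars.all (fun c => decide ((bitsOf c).length = 4)) = true := by rfl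

theorem factLen : ∀ c ∈ hexChars, (bitsOf c).length = 4 :=
  fun c hc => of_decide_eq_true (List.all_eq_true.mp factLen_b c hc)

theorem join_nil_flatten (ll : List (List Char)) : PySem.Chars.join [] ll = ll.flatten := by
  induction ll with
  | nil => simp [PySem.Chars.join_nil]
  | cons p rest ih =>
    cases rest with
    | nil => simp [PySem.Chars.join_singleton]
    | cons q rs => rw [PySem.Chars.join_cons_cons]; simp [ih]

theorem mapA_strs (cs : List Char) (h : ∀ c ∈ cs, c ∈ hexChars) :
    ((cs.map (fun c => junkA.get? (String.mk [PySem.Chars.lowerChar c]))).mapM id)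
      = some (cs.map strOf) := by
  induction cs with
  | nil => rfl
  | cons c rest ih =>
    have hc := factA1 c (h c (by simp))
    simp only [List.map_cons, List.mapM_cons, hc, ih (fun x hx => h x (by simp [hx]))]
    rfl

theorem mapM_bits (cs : List Char) (h : ∀ c ∈ cs, c ∈ hexChars) :
    ((cs.map strOf).map String.toList).flatten.mapM
      (fun ch => PySem.Int.ofStr? (String.mk [ch])) = some (cs.flatMap bitsOf) := by
  induction cs with
  | nil => rfl
  | cons c rest ih =>
    simp only [List.map_cons, List.flatten_cons, List.mapM_append,
      factA2 c (h c (by simp)), ih (fun x hx => h x (by simp [hx])), List.flatMap_cons]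
    rfl

theorem rowA (s : String) (h : ∀ c ∈ s.toList, c ∈ hexChars) :
    to_binary_int_arrayA s = some (s.toList.flatMap bitsOf) := by
  unfold to_binary_int_arrayA to_binary_strA
  simp only [PySem.Str.toList_lower, PySem.Chars.lower, List.map_map, Function.comp_def]
  rw [mapA_strs s.toList h]
  simp only [Option.map_some, Option.bind_some, PySem.Str.toList_join]
  have : ("" : String).toList = [] := rfl
  rw [this, join_nil_flatten, mapM_bits s.toList h]

theorem memA (memory : List String) (h : ∀ r ∈ memory, ∀ c ∈ r.toList, c ∈ hexChars) :
    memory.mapM (fun r => to_binary_int_arrayA r)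
      = some (memory.map (fun r => r.toList.flatMap bitsOf)) := by
  induction memory with
  | nil => rfl
  | cons r rest ih =>
    simp only [List.mapM_cons, rowA r (h r (by simp)),
      ih (fun x hx => h x (by simp [hx])), List.map_cons]
    rfl

theorem rowB (cs : List Char) (h : ∀ c ∈ cs, c ∈ hexChars) :
    ((cs.map PySem.Chars.lowerChar).mapM (fun ch => popTableB.get? (String.mk [ch])))
      = some (cs.map popOf) := by
  induction cs with
  | nil => rfl
  | cons c rest ih =>
    simp only [List.map_cons, List.mapM_cons, factB c (h c (by simp)),
      ih (fun x hx => h x (by simp [hx]))]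
    rfl

theorem memB (memory : List String) (h : ∀ r ∈ memory, ∀ c ∈ r.toList, c ∈ hexChars) :
    (memory.flatMap (fun row => (PySem.Str.lower row).toList)).mapM
        (fun ch => popTableB.get? (String.mk [ch]))
      = some (memory.flatMap (fun r => r.toList.map popOf)) := by
  induction memory with
  | nil => rfl
  | cons r rest ih =>
    have ih' := ih (fun x hx => h x (by simp [hx]))
    simp only [PySem.Str.toList_lower, PySem.Chars.lower] at ih' ⊢
    simp only [List.flatMap_cons, List.mapM_append, rowB r.toList (h r (by simp)), ih']
    rfl

theorem foldl_add_eq_sum (l : List Int) : l.foldl (· + ·) 0 = l.sum := by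
  simp [List.sum_eq_foldl]

theorem sum_row (cs : List Char) : (cs.flatMap bitsOf).sum = (cs.map popOf).sum := by
  induction cs with
  | nil => rfl
  | cons c rest ih => simp [List.flatMap_cons, List.sum_append, ih, popOf]

theorem sum_total (memory : List String) :
    ((memory.map (fun r => r.toList.flatMap bitsOf)).map (fun r => r.foldl (· + ·) 0)).foldl (· + ·) 0
      = (memory.flatMap (fun r => r.toList.map popOf)).foldl (· + ·) 0 := by
  simp only [foldl_add_eq_sum, List.map_map, Function.comp_def]
  induction memory with
  | nil => rfl
  | cons r rest ih =>
    rw [List.map_cons, List.sum_cons, ih, List.flatMap_cons, List.sum_append, sum_row]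

theorem lenRow (cs : List Char) (h : ∀ c ∈ cs, c ∈ hexChars) :
    (cs.flatMap bitsOf).length = 4 * cs.length := by
  induction cs with
  | nil => rfl
  | cons c rest ih =>
    simp only [List.flatMap_cons, List.length_append, factLen c (h c (by simp)),
      ih (fun x hx => h x (by simp [hx])), List.length_cons]
    ring

-- ===== VERDICT (by name: the statement is the Claim_ definition above) =====
theorem get_num_square_of_type_spec : Claim_equal_get_num_square_of_type := by
  intro memory used _ hPre
  obtain ⟨hne, hhexb⟩ := hPre
  have hhex : ∀ r ∈ memory, ∀ c ∈ r.toList, c ∈ hexChars := fun r hr c hc =>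
    of_decide_eq_true (List.all_eq_true.mp (List.all_eq_true.mp hhexb r hr) c hc)
  unfold Spec_get_num_square_of_type get_num_square_of_type get_num_square_of_type_alt
  rw [memA memory hhex, memB memory hhex]
  cases memory with
  | nil => exact absurd rfl hne
  | cons r rest =>
    simp only [List.map_cons, PySem.List.pyGet?_zero_cons]
    have hsum := sum_total (r :: rest)
    simp only [List.map_cons] at hsum
    rw [hsum]
    cases used with
    | false =>
      simp only [if_neg (by decide : ¬ (false = true))]
      rw [lenRow r.toList (hhex r (by simp))]
      simp [PySem.Str.len_eq]
    | true => simp
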